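-- pv_equiv track=rewrite | github.com/tjsdud594/Algorithm | basic/programmers/RotateParenthesis.py | solution
-- ===== SOURCE A (Python) =====
-- def solution(s):
--     answer = 0
--     for idx in range(len(s)):
--         tmp_s = s[idx:]+s[:idx]
--         while 1:
--             length = len(tmp_s)
--             tmp_s = tmp_s.replace("()", "")
--             tmp_s = tmp_s.replace("{}", "")
--             tmp_s = tmp_s.replace("[]", "")
--             if len(tmp_s)==0:
--                 answer+=1
--                 break
--             if length==len(tmp_s):
--                 break
--     return answer
-- ===== SOURCE B (Python) =====
-- def solution(s):
--     pairs = {')': '(', '}': '{', ']': '['}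
--     n = len(s)
--     answer = 0
--     for i in range(n):
--         stack = []
--         ok = True
--         for ch in s[i:] + s[:i]:
--             if ch in '({[':
--                 stack.append(ch)
--             elif ch in pairs and stack and stack[-1] == pairs[ch]:
--                 stack.pop()
--             else:
--                 ok = False
--                 break
--         if ok and not stack:
--             answer += 1
--     return answer
-- ===== Notes on version B (the rewrite author's own statement) =====
-- stated objective: faster
-- what changed: Replaced the per-rotation iterated string.replace reduction loop with a single left-to-right stack-based balance check per rotation.
import Mathlib
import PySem

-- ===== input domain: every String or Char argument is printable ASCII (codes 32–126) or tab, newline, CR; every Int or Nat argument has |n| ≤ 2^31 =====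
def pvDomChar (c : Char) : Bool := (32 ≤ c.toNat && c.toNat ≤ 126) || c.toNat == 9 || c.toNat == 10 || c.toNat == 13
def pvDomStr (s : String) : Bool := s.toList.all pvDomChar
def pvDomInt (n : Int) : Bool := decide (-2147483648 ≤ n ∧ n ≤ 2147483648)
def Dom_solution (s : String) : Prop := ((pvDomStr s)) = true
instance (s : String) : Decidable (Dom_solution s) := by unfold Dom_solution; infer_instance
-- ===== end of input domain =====

-- B replaces A's per-rotation iterated-replace reduction loop with one stack pass per rotation; same return value.

-- ===== PORT A =====
-- one body of A's while-loop: the three replace("()","") / ("{}","") / ("[]","") calls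
def rm3 (t : List Char) : List Char :=
  PySem.Chars.replace (PySem.Chars.replace (PySem.Chars.replace t ['(', ')'] []) ['{', '}'] []) ['[', ']'] []

-- A's `while 1` loop; fuel only makes the recursion structural (the Python loop shrinks tmp_s or breaks,
-- so fuel = length + 1 is never exhausted (see aLoop_iff below))
def aLoop : Nat → List Char → Bool
  | 0, _ => false
  | fuel + 1, t =>
    let length := t.length
    let t3 := rm3 t
    if t3.length = 0 then true
    else if length = t3.length then false
    else aLoop fuel t3

def solution (s : String) : Int :=
  let cs := s.toList
  (PySem.List.pyRange 0 (PySem.Chars.len cs) 1).foldl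
    (fun answer idx =>
      let tmp := PySem.Chars.slice cs (some idx) none ++ PySem.Chars.slice cs none (some idx)
      if aLoop (tmp.length + 1) tmp then answer + 1 else answer) 0

-- ===== PORT B =====
-- one step of B's inner `for ch in …` loop; `none` is the broken/failed state (ok = False)
def altStep (st : Option (List Char)) (ch : Char) : Option (List Char) :=
  match st with
  | none => none
  | some stack =>
    if ch = '(' ∨ ch = '{' ∨ ch = '[' then some (ch :: stack)
    else if ch = ')' then (match stack with | '(' :: r => some r | _ => none)
    else if ch = '}' then (match stack with | '{' :: r => some r | _ => none)
    else if ch = ']' then (match stack with | '[' :: r => some r | _ => none)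
    else none

def solution_alt (s : String) : Int :=
  let cs := s.toList
  (PySem.List.pyRange 0 (PySem.Chars.len cs) 1).foldl
    (fun answer i =>
      let rot := PySem.Chars.slice cs (some i) none ++ PySem.Chars.slice cs none (some i)
      if rot.foldl altStep (some []) = some [] then answer + 1 else answer) 0

-- ===== PRECONDITION & SPEC =====
def Spec_solution (s : String) (out : Int) : Prop := out = solution_alt s
instance (s : String) (out : Int) : Decidable (Spec_solution s out) := by unfold Spec_solution; infer_instance

-- ===== CLAIM (what is proved, stated in full; the proofs are below) =====
def Claim_equal_solution : Prop := ∀ (s : String), Dom_solution s → Spec_solution s (solution s)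

-- ===== LEMMAS AND PROOFS =====

-- Python's t.replace([o,c], "") as a direct recursive scan
def rmPair (o c : Char) : List Char → List Char
  | [] => []
  | [x] => [x]
  | x :: y :: r => if x = o ∧ y = c then rmPair o c r else x :: rmPair o c (y :: r)

theorem rmPair_length_le (o c : Char) (l : List Char) : (rmPair o c l).length ≤ l.length := by
  fun_induction rmPair o c l <;> simp_all
  omega

theorem rmPair_eq_of_length (o c : Char) (l : List Char)
    (h : (rmPair o c l).length = l.length) : rmPair o c l = l := by
  fun_induction rmPair o c l with
  | case1 => rfl
  | case2 => rfl
  | case3 x y r h3 ih =>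
    exfalso
    have := rmPair_length_le o c r
    simp [h3] at h
    omega
  | case4 x y r h3 ih =>
    simp at h ⊢
    exact ih h

-- Chars.replace with a 2-char pattern and empty replacement is rmPair
theorem replace_go_eq (o c : Char) (fuel : Nat) (l acc : List Char) (h : l.length ≤ fuel) :
    PySem.Chars.replace.go [o, c] [] fuel l acc = acc.reverse ++ rmPair o c l := by
  induction fuel generalizing l acc with
  | zero =>
    have hl : l = [] := List.eq_nil_of_length_eq_zero (Nat.le_zero.mp h)
    subst hl
    rw [PySem.Chars.replace.go]
    simp [rmPair]
  | succ fuel ih =>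
    cases l with
    | nil =>
      rw [PySem.Chars.replace.go]
      · simp [rmPair]
      · omega
    | cons x t =>
      rw [PySem.Chars.replace.go]
      by_cases hp : [o, c].isPrefixOf (x :: t) = true
      · have hpre : [o, c] <+: x :: t := List.isPrefixOf_iff_prefix.mp hp
        obtain ⟨t', ht⟩ := hpre
        injection ht with h1 h2
        subst h1
        subst h2
        have hlen : t'.length ≤ fuel := by simp at h; omega
        rw [if_pos hp]
        rw [show List.drop [o, c].length (o :: [c].append t') = t' from rfl]
        rw [ih t' _ hlen]
        show acc.reverse ++ rmPair o c t' = acc.reverse ++ rmPair o c (o :: c :: t')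
        simp [rmPair]
      · rw [if_neg hp]
        cases t with
        | nil =>
          cases fuel with
          | zero =>
            rw [PySem.Chars.replace.go]
            simp [rmPair]
          | succ f =>
            rw [PySem.Chars.replace.go]
            · simp [rmPair]
            · omega
        | cons y r =>
          have hlen : (y :: r).length ≤ fuel := by simp at h ⊢; omega
          rw [ih (y :: r) _ hlen]
          have hne : ¬ (x = o ∧ y = c) := by
            intro ⟨h1, h2⟩
            subst h1; subst h2
            simp [List.isPrefixOf] at hp
          simp [rmPair, hne]

theorem replace_pair_eq_rmPair (o c : Char) (l : List Char) :
    PySem.Chars.replace l [o, c] [] = rmPair o c l := by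
  unfold PySem.Chars.replace
  rw [if_neg (by simp)]
  rw [replace_go_eq o c l.length l [] le_rfl]
  simp

def closes (o c : Char) : Prop :=
  (o = '(' ∧ c = ')') ∨ (o = '{' ∧ c = '}') ∨ (o = '[' ∧ c = ']')

theorem altStep_pair {o c : Char} (h : closes o c) (st : Option (List Char)) :
    altStep (altStep st o) c = st := by
  rcases st with _ | stk
  · rcases h with ⟨h1, h2⟩ | ⟨h1, h2⟩ | ⟨h1, h2⟩ <;> subst h1 <;> subst h2 <;> rfl
  · rcases h with ⟨h1, h2⟩ | ⟨h1, h2⟩ | ⟨h1, h2⟩ <;> subst h1 <;> subst h2 <;> rfl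

-- removing matched adjacent pairs does not change the stack run
theorem foldl_rmPair {o c : Char} (h : closes o c) (l : List Char) (st : Option (List Char)) :
    (rmPair o c l).foldl altStep st = l.foldl altStep st := by
  fun_induction rmPair o c l generalizing st with
  | case1 => rfl
  | case2 => rfl
  | case3 x y r h3 ih =>
    obtain ⟨hx, hy⟩ := h3; subst hx; subst hy
    simp only [List.foldl_cons]
    rw [altStep_pair h st, ih]
  | case4 x y r h3 ih =>
    simp only [List.foldl_cons]
    rw [ih]
    rfl

theorem foldl_rm3 (l : List Char) (st : Option (List Char)) :
    (rm3 l).foldl altStep st = l.foldl altStep st := by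
  unfold rm3
  rw [replace_pair_eq_rmPair, replace_pair_eq_rmPair, replace_pair_eq_rmPair]
  rw [foldl_rmPair (by simp [closes]), foldl_rmPair (by simp [closes]),
      foldl_rmPair (by simp [closes])]

theorem rm3_length_le (l : List Char) : (rm3 l).length ≤ l.length := by
  unfold rm3
  rw [replace_pair_eq_rmPair, replace_pair_eq_rmPair, replace_pair_eq_rmPair]
  calc (rmPair '[' ']' _).length ≤ _ := rmPair_length_le _ _ _
    _ ≤ _ := rmPair_length_le _ _ _
    _ ≤ _ := rmPair_length_le _ _ _

theorem rm3_eq_of_length (l : List Char) (h : (rm3 l).length = l.length) :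
    rmPair '(' ')' l = l ∧ rmPair '{' '}' l = l ∧ rmPair '[' ']' l = l := by
  unfold rm3 at h
  rw [replace_pair_eq_rmPair, replace_pair_eq_rmPair, replace_pair_eq_rmPair] at h
  have l1 := rmPair_length_le '(' ')' l
  have l2 := rmPair_length_le '{' '}' (rmPair '(' ')' l)
  have l3 := rmPair_length_le '[' ']' (rmPair '{' '}' (rmPair '(' ')' l))
  have e1 : rmPair '(' ')' l = l := rmPair_eq_of_length _ _ _ (by omega)
  rw [e1] at h l2 l3 ⊢
  have e2 : rmPair '{' '}' l = l := rmPair_eq_of_length _ _ _ (by omega)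
  rw [e2] at h l3 ⊢
  have e3 : rmPair '[' ']' l = l := rmPair_eq_of_length _ _ _ (by omega)
  exact ⟨rfl, rfl, e3⟩

-- a string with no removable adjacent pair: the head of l does not close the top of stk
def noPairAt (l stk : List Char) : Prop :=
  match l, stk with
  | d :: _, o :: _ => ¬ closes o d
  | _, _ => True

def hasPairB (o c : Char) : List Char → Bool
  | [] => false
  | [_] => false
  | x :: y :: r => (x = o ∧ y = c : Bool) || hasPairB o c (y :: r)

theorem hasPairB_false_of_rmPair_eq (o c : Char) (l : List Char) (h : rmPair o c l = l) :
    hasPairB o c l = false := by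
  fun_induction rmPair o c l with
  | case1 => rfl
  | case2 => rfl
  | case3 x y r h3 ih =>
    exfalso
    have := rmPair_length_le o c r
    have : (rmPair o c r).length = (x :: y :: r).length := by rw [h]
    simp at this
    omega
  | case4 x y r h3 ih =>
    injection h with _ h2
    simp [hasPairB, ih h2]
    tauto

theorem foldl_altStep_none (l : List Char) : l.foldl altStep none = none := by
  induction l with
  | nil => rfl
  | cons x t ih => simpa [altStep] using ih

theorem hasPairB_tail (o c x : Char) (t : List Char) (h : hasPairB o c (x :: t) = false) :
    hasPairB o c t = false := by
  cases t with
  | nil => rfl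
  | cons y r => simp [hasPairB] at h ⊢; tauto

theorem altStep_open {ch : Char} (h : ch = '(' ∨ ch = '{' ∨ ch = '[') (stk : List Char) :
    altStep (some stk) ch = some (ch :: stk) := by
  unfold altStep
  dsimp only
  rw [if_pos h]

theorem altStep_none_of (ch : Char) (stk : List Char)
    (hop : ¬ (ch = '(' ∨ ch = '{' ∨ ch = '['))
    (hnp : ∀ o r, stk = o :: r → ¬ closes o ch) :
    altStep (some stk) ch = none := by
  unfold altStep
  dsimp only
  rw [if_neg hop]
  split_ifs with hc1 hc2 hc3
  · cases stk with
    | nil => rfl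
    | cons o r =>
      by_cases ho : o = '('
      · exact absurd (by simp [closes, ho, hc1]) (hnp o r rfl)
      · split <;> simp_all
  · cases stk with
    | nil => rfl
    | cons o r =>
      by_cases ho : o = '{'
      · exact absurd (by simp [closes, ho, hc2]) (hnp o r rfl)
      · split <;> simp_all
  · cases stk with
    | nil => rfl
    | cons o r =>
      by_cases ho : o = '['
      · exact absurd (by simp [closes, ho, hc3]) (hnp o r rfl)
      · split <;> simp_all
  · rfl

theorem no_pop_run (l : List Char)
    (h1 : hasPairB '(' ')' l = false) (h2 : hasPairB '{' '}' l = false)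
    (h3 : hasPairB '[' ']' l = false) :
    ∀ stk fin, noPairAt l stk → l.foldl altStep (some stk) = some fin →
      ∃ ext, fin = ext ++ stk ∧ (l ≠ [] → ext ≠ []) := by
  induction l with
  | nil =>
    intro stk fin _ hrun
    exact ⟨[], by simpa using hrun.symm, fun h => absurd rfl h⟩
  | cons ch rest ih =>
    intro stk fin hnp hrun
    by_cases hop : ch = '(' ∨ ch = '{' ∨ ch = '['
    · rw [List.foldl_cons, altStep_open hop] at hrun
      have hnp' : noPairAt rest (ch :: stk) := by
        cases rest with
        | nil => trivial
        | cons d r2 =>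
          show ¬ closes ch d
          intro hcl
          rcases hcl with ⟨e1, e2⟩ | ⟨e1, e2⟩ | ⟨e1, e2⟩
          · subst e1; subst e2; simp [hasPairB] at h1
          · subst e1; subst e2; simp [hasPairB] at h2
          · subst e1; subst e2; simp [hasPairB] at h3
      obtain ⟨ext', hfin, _⟩ := ih (hasPairB_tail _ _ _ _ h1) (hasPairB_tail _ _ _ _ h2)
        (hasPairB_tail _ _ _ _ h3) (ch :: stk) fin hnp' hrun
      refine ⟨ext' ++ [ch], by simp [hfin], fun _ => by simp⟩
    · have hnone : altStep (some stk) ch = none := by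
        apply altStep_none_of ch stk hop
        intro o r hstk hcl
        rw [hstk] at hnp
        exact hnp hcl
      rw [List.foldl_cons, hnone, foldl_altStep_none] at hrun
      exact absurd hrun (by simp)

theorem aLoop_iff (l : List Char) (fuel : Nat) (h : l.length < fuel) :
    aLoop fuel l = true ↔ l.foldl altStep (some []) = some [] := by
  induction fuel generalizing l with
  | zero => omega
  | succ f ih =>
    rw [aLoop]
    by_cases h0 : (rm3 l).length = 0
    · rw [if_pos h0]
      have ht : rm3 l = [] := List.eq_nil_of_length_eq_zero h0
      have := foldl_rm3 l (some [])
      rw [ht] at this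
      simp only [List.foldl_nil] at this
      simp [this.symm]
    · rw [if_neg h0]
      by_cases heq : l.length = (rm3 l).length
      · rw [if_pos heq]
        obtain ⟨e1, e2, e3⟩ := rm3_eq_of_length l heq.symm
        have hb1 := hasPairB_false_of_rmPair_eq _ _ _ e1
        have hb2 := hasPairB_false_of_rmPair_eq _ _ _ e2
        have hb3 := hasPairB_false_of_rmPair_eq _ _ _ e3
        constructor
        · intro hfalse; exact absurd hfalse (by simp)
        · intro hrun
          have hlne : l ≠ [] := by
            intro hl; subst hl; exact h0 rfl
          obtain ⟨ext, hfin, hne⟩ := no_pop_run l hb1 hb2 hb3 [] [] (by cases l <;> trivial) hrun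
          simp at hfin
          exact absurd hfin (hne hlne)
      · rw [if_neg heq]
        have hlt : (rm3 l).length < f := by
          have := rm3_length_le l
          omega
        rw [ih (rm3 l) hlt]
        rw [foldl_rm3]

-- ===== VERDICT (by name: the statement is the Claim_ definition above) =====
theorem solution_spec : Claim_equal_solution := by
  intro s _
  unfold Spec_solution solution solution_alt
  dsimp only
  congr 1
  funext answer idx
  set rot := PySem.Chars.slice s.toList (some idx) none ++ PySem.Chars.slice s.toList none (some idx) with hrot
  have h := aLoop_iff rot (rot.length + 1) (Nat.lt_succ_self _)
  by_cases hc : rot.foldl altStep (some []) = some []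
  · rw [if_pos (h.mpr hc), if_pos hc]
  · have hf : ¬ (aLoop (rot.length + 1) rot = true) := fun ht => hc (h.mp ht)
    rw [if_neg hf, if_neg hc]
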